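-- pv_equiv track=rewrite | github.com/vandriiashen/flexsim | flexsim/transform.py | keep_few_clusters
-- ===== SOURCE A (Python) =====
-- def keep_few_clusters(class_sizes, tg_count):
--     sorted_sizes = sorted(class_sizes.items(), key = lambda x: x[1], reverse=True)
--     cluster_seq = []
--
--     max_class_num = 3
--     for i in range(max_class_num):
--         for k, v in sorted_sizes:
--             if v < tg_count:
--                 cluster_seq.append(k)
--                 tg_count -= v
--                 sorted_sizes.remove((k, v))
--                 break
--
--     return cluster_seq
-- ===== SOURCE B (Python) =====
-- def keep_few_clusters(class_sizes, tg_count):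
--     cluster_seq = []
--     used = set()
--     for _ in range(3):
--         best = None
--         for k, v in class_sizes.items():
--             if k not in used and v < tg_count and (best is None or v > best[1]):
--                 best = (k, v)
--         if best is not None:
--             cluster_seq.append(best[0])
--             tg_count -= best[1]
--             used.add(best[0])
--     return cluster_seq
-- ===== Notes on version B (the rewrite author's own statement) =====
-- stated objective: alternative
-- what changed: Instead of sorting all items descending and repeatedly removing the chosen pair from the sorted list, B makes at most 3 linear scans over the dict in insertion order, each tracking the strict maximum value below tg_count among not-yet-chosen keys.
import Mathlib
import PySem

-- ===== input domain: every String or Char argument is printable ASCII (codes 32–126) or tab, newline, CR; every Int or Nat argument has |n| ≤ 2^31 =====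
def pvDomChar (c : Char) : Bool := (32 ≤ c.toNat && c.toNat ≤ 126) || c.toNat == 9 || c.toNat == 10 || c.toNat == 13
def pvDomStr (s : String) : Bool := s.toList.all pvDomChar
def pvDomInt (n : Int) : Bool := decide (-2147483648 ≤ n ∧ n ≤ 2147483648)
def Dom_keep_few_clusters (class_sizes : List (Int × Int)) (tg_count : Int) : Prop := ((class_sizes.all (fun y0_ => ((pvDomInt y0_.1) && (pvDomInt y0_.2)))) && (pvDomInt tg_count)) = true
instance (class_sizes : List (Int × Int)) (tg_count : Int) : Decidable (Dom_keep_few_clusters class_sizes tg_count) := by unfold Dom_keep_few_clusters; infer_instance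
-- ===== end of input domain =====

-- B replaces A's sort-then-remove selection by three linear max-scans over the items in dict order (alternative decomposition, same results).


-- ===== PORT A =====
-- inner 'for k, v in sorted_sizes: if v < tg: … break' — find the first pair with value < tg
def kfcFind : List (Int × Int) → Int → Option (Int × Int)
  | [], _ => none
  | (k, v) :: rest, tg => if v < tg then some (k, v) else kfcFind rest tg

-- one iteration of the outer 'for i in range(3)' loop; state = (sorted_sizes, cluster_seq, tg_count).
-- '.getD s.1' only totalises remove?: the removed pair was found in the list, so remove? always succeeds here.
def kfcStepA (s : List (Int × Int) × List Int × Int) : List (Int × Int) × List Int × Int :=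
  match kfcFind s.1 s.2.2 with
  | none => s
  | some (k, v) => ((PySem.List.remove? s.1 (k, v)).getD s.1, s.2.1 ++ [k], s.2.2 - v)

def keep_few_clusters (class_sizes : List (Int × Int)) (tg_count : Int) : List Int :=
  ((List.range 3).foldl (fun s _ => kfcStepA s)
    (PySem.List.sorted class_sizes (fun p => p.2) true, ([] : List Int), tg_count)).2.1

-- ===== PORT B =====
-- inner scan: best candidate (unused key, value < tg, strictly larger value than current best)
def kfcScan (class_sizes : List (Int × Int)) (used : PySem.Set Int) (tg : Int) : Option (Int × Int) :=
  class_sizes.foldl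
    (fun best p =>
      if (!(PySem.Set.contains used p.1) && decide (p.2 < tg) &&
          (match best with | none => true | some b => decide (b.2 < p.2))) then some p else best)
    none

-- one round; state = (cluster_seq, used, tg_count)
def kfcStepB (class_sizes : List (Int × Int)) (s : List Int × PySem.Set Int × Int) :
    List Int × PySem.Set Int × Int :=
  match kfcScan class_sizes s.2.1 s.2.2 with
  | none => s
  | some (k, v) => (s.1 ++ [k], PySem.Set.add s.2.1 k, s.2.2 - v)

def keep_few_clusters_alt (class_sizes : List (Int × Int)) (tg_count : Int) : List Int :=
  ((List.range 3).foldl (fun s _ => kfcStepB class_sizes s)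
    (([] : List Int), (PySem.Set.empty : PySem.Set Int), tg_count)).1

-- ===== PRECONDITION & SPEC =====
-- class_sizes stands for dict.items(): a Python dict cannot contain duplicate keys, so Pre_ requires the keys to be distinct.
def Pre_keep_few_clusters (class_sizes : List (Int × Int)) (tg_count : Int) : Prop :=
  (class_sizes.map Prod.fst).Nodup
instance (class_sizes : List (Int × Int)) (tg_count : Int) : Decidable (Pre_keep_few_clusters class_sizes tg_count) := by unfold Pre_keep_few_clusters; infer_instance
def pvWitness_keep_few_clusters : (List (Int × Int)) × Int := ([(1, 2), (2, 1), (3, 5)], 4)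

def Spec_keep_few_clusters (class_sizes : List (Int × Int)) (tg_count : Int) (out : List Int) : Prop := out = keep_few_clusters_alt class_sizes tg_count
instance (class_sizes : List (Int × Int)) (tg_count : Int) (out : List Int) : Decidable (Spec_keep_few_clusters class_sizes tg_count out) := by unfold Spec_keep_few_clusters; infer_instance

-- ===== CLAIM (what is proved, stated in full; the proofs are below) =====
def Claim_equal_keep_few_clusters : Prop := ∀ (class_sizes : List (Int × Int)) (tg_count : Int), Dom_keep_few_clusters class_sizes tg_count → Pre_keep_few_clusters class_sizes tg_count → Spec_keep_few_clusters class_sizes tg_count (keep_few_clusters class_sizes tg_count)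

-- ===== LEMMAS AND PROOFS =====

def kfcIns (acc : List (Int × Int)) (x : Int × Int) : List (Int × Int) :=
  PySem.List.insertBy (fun a b => decide (b.2 < a.2)) x acc

theorem kfc_sorted_eq (xs : List (Int × Int)) :
    PySem.List.sorted xs (fun p => p.2) true = xs.foldl kfcIns [] := by
  simpa [kfcIns] using PySem.List.sorted_rev_eq_foldl_insertBy xs (fun p => p.2)

theorem kfc_insertBy_head_cons (x : Int × Int) (l : List (Int × Int))
    (h : ∀ z ∈ l, decide (z.2 < x.2) = true) :
    PySem.List.insertBy (fun a b => decide (b.2 < a.2)) x l = x :: l := by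
  cases l with
  | nil => rfl
  | cons y ys =>
    simp [PySem.List.insertBy, h y (List.mem_cons_self ..)]

theorem kfc_pairwise_insertBy (x : Int × Int) (l : List (Int × Int))
    (h : l.Pairwise (fun a b => b.2 ≤ a.2)) :
    (kfcIns l x).Pairwise (fun a b => b.2 ≤ a.2) := by
  induction l with
  | nil => simp [kfcIns, PySem.List.insertBy]
  | cons y ys ih =>
    rcases List.pairwise_cons.1 h with ⟨hy, hys⟩
    by_cases hc : y.2 < x.2
    · simp only [kfcIns, PySem.List.insertBy, decide_eq_true_eq, if_pos hc]
      refine List.pairwise_cons.2 ⟨?_, h⟩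
      intro z hz
      rcases List.mem_cons.1 hz with rfl | hz
      · exact le_of_lt hc
      · exact le_trans (hy z hz) (le_of_lt hc)
    · simp only [kfcIns, PySem.List.insertBy, decide_eq_true_eq, if_neg hc]
      refine List.pairwise_cons.2 ⟨?_, ih hys⟩
      intro z hz
      have := PySem.List.mem_insertBy (before := fun a b => decide (b.2 < a.2)) (x := x) (ys := ys) (y := z)
      rcases this.1 hz with rfl | hz2
      · exact le_of_not_gt hc
      · exact hy z hz2

theorem kfc_filter_insertBy (Q : Int × Int → Bool) (x : Int × Int) (l : List (Int × Int))
    (h : l.Pairwise (fun a b => b.2 ≤ a.2)) :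
    (kfcIns l x).filter Q = if Q x then kfcIns (l.filter Q) x else l.filter Q := by
  induction l with
  | nil => cases hq : Q x <;> simp [kfcIns, PySem.List.insertBy, hq]
  | cons y ys ih =>
    rcases List.pairwise_cons.1 h with ⟨hy, hys⟩
    by_cases hc : y.2 < x.2
    · -- insertBy = x :: y :: ys
      have e1 : kfcIns (y :: ys) x = x :: y :: ys := by
        simp [kfcIns, PySem.List.insertBy, hc]
      rw [e1]
      cases hq : Q x with
      | false => simp [List.filter, hq]
      | true =>
        simp only [List.filter, hq, if_true]
        cases hqy : Q y with
        | true =>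
          have : kfcIns (y :: List.filter Q ys) x = x :: y :: List.filter Q ys :=
            by simp [kfcIns, PySem.List.insertBy, hc]
          simp [List.filter, hqy, this]
        | false =>
          have : kfcIns (List.filter Q ys) x = x :: List.filter Q ys := by
            apply kfc_insertBy_head_cons
            intro z hz
            have hz' : z ∈ ys := List.mem_of_mem_filter hz
            simp only [decide_eq_true_eq]
            exact lt_of_le_of_lt (hy z hz') hc
          simp [List.filter, hqy, this]
    · -- insertBy = y :: insertBy x ys
      have e1 : kfcIns (y :: ys) x = y :: kfcIns ys x := by
        simp [kfcIns, PySem.List.insertBy, hc]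
      rw [e1]
      cases hqy : Q y with
      | true =>
        cases hq : Q x with
        | true =>
          have e2 : kfcIns (y :: List.filter Q ys) x = y :: kfcIns (List.filter Q ys) x := by
            simp [kfcIns, PySem.List.insertBy, hc]
          simp [List.filter, hqy, hq, e2, ih hys]
        | false => simp [List.filter, hqy, hq, ih hys]
      | false =>
        simp [List.filter, hqy, ih hys]

theorem kfc_filter_foldl (Q : Int × Int → Bool) (xs : List (Int × Int)) (acc : List (Int × Int))
    (h : acc.Pairwise (fun a b => b.2 ≤ a.2)) :
    (xs.foldl kfcIns acc).filter Q = (xs.filter Q).foldl kfcIns (acc.filter Q) := by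
  induction xs generalizing acc with
  | nil => simp
  | cons x xs ih =>
    simp only [List.foldl_cons]
    rw [ih _ (kfc_pairwise_insertBy x acc h), kfc_filter_insertBy Q x acc h]
    cases hq : Q x <;> simp [List.filter, hq]

theorem kfc_filter_sorted (Q : Int × Int → Bool) (xs : List (Int × Int)) :
    (PySem.List.sorted xs (fun p => p.2) true).filter Q
      = PySem.List.sorted (xs.filter Q) (fun p => p.2) true := by
  rw [kfc_sorted_eq, kfc_sorted_eq, kfc_filter_foldl Q xs [] (by simp)]
  rfl

theorem kfc_find_eq_head (l : List (Int × Int)) (tg : Int) :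
    kfcFind l tg = (l.filter (fun p => decide (p.2 < tg))).head? := by
  induction l with
  | nil => rfl
  | cons p rest ih =>
    obtain ⟨k, v⟩ := p
    by_cases hv : v < tg
    · simp [kfcFind, List.filter, hv]
    · simp [kfcFind, List.filter, hv, ih]

theorem kfc_head_insertBy (x : Int × Int) (l : List (Int × Int)) :
    (PySem.List.insertBy (fun a b => decide (b.2 < a.2)) x l).head?
      = some (match l.head? with
              | none => x
              | some h => if h.2 < x.2 then x else h) := by
  cases l with
  | nil => rfl
  | cons y ys =>
    by_cases hc : y.2 < x.2 <;> simp [PySem.List.insertBy, hc]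

theorem kfc_scan2_eq_head (m : List (Int × Int)) :
    (m.foldl (fun best p =>
        if (match best with | none => true | some b => decide (b.2 < p.2)) then some p else best) none)
      = (PySem.List.sorted m (fun p => p.2) true).head? := by
  rw [kfc_sorted_eq]
  induction m using List.reverseRecOn with
  | nil => rfl
  | append_singleton m p ih =>
    rw [List.foldl_append, List.foldl_append, ih]
    simp only [List.foldl_cons, List.foldl_nil]
    rw [show kfcIns (m.foldl kfcIns []) p = PySem.List.insertBy (fun a b => decide (b.2 < a.2)) p (m.foldl kfcIns []) from rfl,
        kfc_head_insertBy]
    cases h : (m.foldl kfcIns []).head? with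
    | none => simp
    | some b => by_cases hb : b.2 < p.2 <;> simp [hb]

def kfcP (used : PySem.Set Int) (p : Int × Int) : Bool := !(PySem.Set.contains used p.1)

theorem kfc_scan_eq_scan2_aux (cs : List (Int × Int)) (used : PySem.Set Int) (tg : Int)
    (init : Option (Int × Int)) :
    cs.foldl
      (fun best p =>
        if (!(PySem.Set.contains used p.1) && decide (p.2 < tg) &&
            (match best with | none => true | some b => decide (b.2 < p.2))) then some p else best)
      init
    = (cs.filter (fun p => kfcP used p && decide (p.2 < tg))).foldl
        (fun best p =>
          if (match best with | none => true | some b => decide (b.2 < p.2)) then some p else best)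
        init := by
  induction cs generalizing init with
  | nil => rfl
  | cons p rest ih =>
    simp only [List.foldl_cons, List.filter]
    by_cases h1 : kfcP used p && decide (p.2 < tg)
    · rw [h1]
      simp only [kfcP] at h1
      rw [Bool.and_eq_true] at h1
      simp only [h1.1, h1.2, Bool.true_and, List.foldl_cons]
      exact ih _
    · rw [Bool.not_eq_true] at h1
      rw [h1]
      have : (!(PySem.Set.contains used p.1) && decide (p.2 < tg) &&
          (match init with | none => true | some b => decide (b.2 < p.2))) = false := by
        simp only [kfcP] at h1
        rw [h1]
        simp
      rw [this]
      simp only [if_false]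
      exact ih _

theorem kfc_scan_eq_scan2 (cs : List (Int × Int)) (used : PySem.Set Int) (tg : Int) :
    kfcScan cs used tg
      = ((cs.filter (fun p => kfcP used p && decide (p.2 < tg))).foldl
          (fun best p =>
            if (match best with | none => true | some b => decide (b.2 < p.2)) then some p else best) none) :=
  kfc_scan_eq_scan2_aux cs used tg none

theorem kfc_select (cs : List (Int × Int)) (used : PySem.Set Int) (tg : Int) :
    kfcFind ((PySem.List.sorted cs (fun p => p.2) true).filter (kfcP used)) tg
      = kfcScan cs used tg := by
  rw [kfc_find_eq_head, kfc_scan_eq_scan2, kfc_scan2_eq_head, List.filter_filter,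
      ← kfc_filter_sorted]
  congr 1
  apply List.filter_congr
  intro p _
  rw [Bool.and_comm]

theorem kfc_erase_eq_filter (l : List (Int × Int)) (k v : Int)
    (hnd : (l.map Prod.fst).Nodup) (hm : (k, v) ∈ l) :
    l.erase (k, v) = l.filter (fun p => p.1 != k) := by
  induction l with
  | nil => simp at hm
  | cons y ys ih =>
    rw [List.map_cons, List.nodup_cons] at hnd
    obtain ⟨hy, hys⟩ := hnd
    by_cases he : y = (k, v)
    · subst he
      rw [List.erase_cons_head]
      have hall : ∀ p ∈ ys, (p.1 != k) = true := by
        intro p hp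
        simp only [bne_iff_ne, ne_eq]
        intro hc
        exact hy (List.mem_map.2 ⟨p, hp, by simpa using hc⟩)
      rw [List.filter_cons_of_neg (by simp)]
      exact (List.filter_eq_self.2 hall).symm
    · have hm' : (k, v) ∈ ys := by
        rcases List.mem_cons.1 hm with h | h
        · exact absurd h.symm he
        · exact h
      have hyk : (y.1 != k) = true := by
        simp only [bne_iff_ne, ne_eq]
        intro hc
        exact hy (List.mem_map.2 ⟨(k, v), hm', by simp [hc]⟩)
      rw [List.erase_cons_tail (by simpa using he)]
      simp only [List.filter_cons, hyk, if_true]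
      rw [ih hys hm']

theorem kfc_contains_add (used : PySem.Set Int) (k x : Int) :
    PySem.Set.contains (PySem.Set.add used k) x
      = (PySem.Set.contains used x || decide (x = k)) := by
  by_cases h1 : x ∈ PySem.Set.add used k
  · have h2 := (PySem.Set.mem_add used k x).1 h1
    rw [(PySem.Set.contains_iff _ _).2 h1]
    rcases h2 with h2 | h2
    · rw [(PySem.Set.contains_iff _ _).2 h2]; simp
    · simp [h2]
  · have h2 : ¬ (x ∈ used ∨ x = k) := fun h => h1 ((PySem.Set.mem_add used k x).2 h)
    push_neg at h2
    have c1 : PySem.Set.contains (PySem.Set.add used k) x = false := by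
      cases hc : PySem.Set.contains (PySem.Set.add used k) x
      · rfl
      · exact absurd ((PySem.Set.contains_iff _ _).1 hc) h1
    have c2 : PySem.Set.contains used x = false := by
      cases hc : PySem.Set.contains used x
      · rfl
      · exact absurd ((PySem.Set.contains_iff _ _).1 hc) h2.1
    rw [c1, c2]
    simp [h2.2]

theorem kfc_round (cs : List (Int × Int)) (hnd : (cs.map Prod.fst).Nodup)
    (used : PySem.Set Int) (seq : List Int) (tg : Int) :
    kfcStepA ((PySem.List.sorted cs (fun p => p.2) true).filter (kfcP used), seq, tg)
      = (((PySem.List.sorted cs (fun p => p.2) true).filter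
            (kfcP (kfcStepB cs (seq, used, tg)).2.1)),
         (kfcStepB cs (seq, used, tg)).1, (kfcStepB cs (seq, used, tg)).2.2) := by
  have hnd0 : ((PySem.List.sorted cs (fun p => p.2) true).map Prod.fst).Nodup := by
    have hperm : ((PySem.List.sorted cs (fun p => p.2) true).map Prod.fst).Perm (cs.map Prod.fst) :=
      (PySem.List.sorted_perm cs (fun p => p.2) true).map Prod.fst
    exact hperm.nodup_iff.2 hnd
  have hndf : (((PySem.List.sorted cs (fun p => p.2) true).filter (kfcP used)).map Prod.fst).Nodup := by
    have hsub := List.filter_sublist (p := kfcP used) (l := PySem.List.sorted cs (fun p => p.2) true)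
    exact (hsub.map Prod.fst).nodup hnd0
  have hsel := kfc_select cs used tg
  cases hscan : kfcScan cs used tg with
  | none =>
    rw [hscan] at hsel
    simp only [kfcStepA, kfcStepB, hsel, hscan]
  | some p =>
    obtain ⟨k, v⟩ := p
    rw [hscan] at hsel
    have hmem : (k, v) ∈ (PySem.List.sorted cs (fun p => p.2) true).filter (kfcP used) := by
      rw [kfc_find_eq_head] at hsel
      have := List.mem_of_mem_head? (by rw [hsel]; rfl)
      exact List.mem_of_mem_filter this
    simp only [kfcStepA, kfcStepB, hsel, hscan]
    rw [PySem.List.remove?_eq_some_erase _ _ hmem]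
    simp only [Option.getD_some]
    rw [kfc_erase_eq_filter _ k v hndf hmem, List.filter_filter]
    have hfe : ∀ p ∈ PySem.List.sorted cs (fun q => q.2) true,
        ((p.1 != k) && kfcP used p) = kfcP (PySem.Set.add used k) p := by
      intro p _
      simp only [kfcP, kfc_contains_add]
      cases hcu : PySem.Set.contains used p.1 <;> by_cases hk : p.1 = k <;> simp [hk]
    rw [List.filter_congr hfe]

theorem kfc_rounds (cs : List (Int × Int)) (hnd : (cs.map Prod.fst).Nodup) (n : Nat) :
    ∀ (used : PySem.Set Int) (seq : List Int) (tg : Int),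
    (List.range n).foldl (fun s _ => kfcStepA s)
        ((PySem.List.sorted cs (fun p => p.2) true).filter (kfcP used), seq, tg)
      = (((PySem.List.sorted cs (fun p => p.2) true).filter
            (kfcP ((List.range n).foldl (fun s _ => kfcStepB cs s) (seq, used, tg)).2.1)),
         ((List.range n).foldl (fun s _ => kfcStepB cs s) (seq, used, tg)).1,
         ((List.range n).foldl (fun s _ => kfcStepB cs s) (seq, used, tg)).2.2) := by
  induction n with
  | zero => intro used seq tg; rfl
  | succ n ih =>
    intro used seq tg
    rw [List.range_succ, List.foldl_append, List.foldl_append, ih used seq tg]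
    simp only [List.foldl_cons, List.foldl_nil]
    set b := (List.range n).foldl (fun s _ => kfcStepB cs s) (seq, used, tg) with hb
    have := kfc_round cs hnd b.2.1 b.1 b.2.2
    rw [this]

theorem kfc_main (cs : List (Int × Int)) (tg : Int) (hnd : (cs.map Prod.fst).Nodup) :
    keep_few_clusters cs tg = keep_few_clusters_alt cs tg := by
  unfold keep_few_clusters keep_few_clusters_alt
  have h0 : (PySem.List.sorted cs (fun p => p.2) true).filter (kfcP PySem.Set.empty)
      = PySem.List.sorted cs (fun p => p.2) true := by
    apply List.filter_eq_self.2
    intro p _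
    rfl
  rw [← h0, kfc_rounds cs hnd 3 PySem.Set.empty [] tg]

-- ===== VERDICT (by name: the statement is the Claim_ definition above) =====
theorem keep_few_clusters_spec : Claim_equal_keep_few_clusters := by
  intro cs tg _ hpre
  unfold Spec_keep_few_clusters
  exact kfc_main cs tg hpre
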